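-- pv_equiv track=rewrite | github.com/haitovs/yt-meme-bot | app/uploader.py | _limit_tags
-- ===== SOURCE A (Python) =====
-- from typing import Any, Dict, List, Optional, Tuple
--
-- def _limit_tags(tags: List[str]) -> List[str]:
--     # YouTube tags limit ~500 chars
--     out = []
--     total = 0
--     for t in tags:
--         add = len(t) + (1 if out else 0)
--         if total + add > 490:
--             break
--         out.append(t)
--         total += add
--     return out
-- ===== SOURCE B (Python) =====
-- from typing import Any, Dict, List, Optional, Tuple
-- from itertools import accumulate
--
-- def _limit_tags(tags: List[str]) -> List[str]:
--     # combined length of keeping the first i+1 tags grows by len(tag) plus one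
--     # separator for every tag after the first; keep the prefixes within 490.
--     combined = [len(t) for t in tags[:1]] + [len(t) + 1 for t in tags[1:]]
--     cums = list(accumulate(combined))
--     k = sum(1 for c in cums if c <= 490)
--     return tags[:k]
-- ===== Notes on version B (the rewrite author's own statement) =====
-- stated objective: alternative
-- what changed: Replaces the accumulate-and-break greedy loop with a prefix-sum table of combined lengths, a count of prefixes within the 490 limit, and a single slice.
import Mathlib
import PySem

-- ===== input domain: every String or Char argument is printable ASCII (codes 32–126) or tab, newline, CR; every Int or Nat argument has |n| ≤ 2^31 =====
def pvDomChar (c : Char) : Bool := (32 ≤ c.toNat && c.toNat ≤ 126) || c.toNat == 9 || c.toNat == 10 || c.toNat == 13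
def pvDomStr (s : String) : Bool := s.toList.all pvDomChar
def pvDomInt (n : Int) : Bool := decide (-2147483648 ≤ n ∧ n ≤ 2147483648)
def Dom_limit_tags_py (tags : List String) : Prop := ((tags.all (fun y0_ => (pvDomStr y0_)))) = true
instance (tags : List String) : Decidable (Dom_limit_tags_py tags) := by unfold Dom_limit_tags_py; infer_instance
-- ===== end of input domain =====

-- B replaces A's accumulate-and-break greedy loop with a prefix-sum table of
-- combined lengths, a count of prefixes within the 490 limit, and one slice
-- (alternative decomposition, same asymptotic cost).


-- ===== PORT A =====
-- the for-loop with break over (out, total)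
def limitA_go : List String → List String → Int → List String
  | [], out, _ => out
  | t :: ts, out, total =>
    let add : Int := PySem.Str.len t + (if out.isEmpty then 0 else 1)
    if 490 < total + add then out
    else limitA_go ts (out ++ [t]) (total + add)

def limit_tags_py (tags : List String) : List String := limitA_go tags [] 0

-- ===== PORT B =====
-- combined = [len(t) for t in tags[:1]] + [len(t) + 1 for t in tags[1:]]
def altCombined (tags : List String) : List Int :=
  (PySem.List.slice tags none (some 1)).map (fun t => PySem.Str.len t)
    ++ (PySem.List.slice tags (some 1) none).map (fun t => PySem.Str.len t + 1)

-- cums = list(accumulate(combined))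
def altCums (ws : List Int) : List Int :=
  (ws.foldl (fun (p : List Int × Int) w => (p.1 ++ [p.2 + w], p.2 + w)) ([], 0)).1

def limit_tags_py_alt (tags : List String) : List String :=
  let cums := altCums (altCombined tags)
  let k : Int := cums.foldl (fun acc c => if c ≤ 490 then acc + 1 else acc) 0
  PySem.List.slice tags none (some k)

-- ===== PRECONDITION & SPEC =====
def Spec_limit_tags_py (tags : List String) (out : List String) : Prop := out = limit_tags_py_alt tags
instance (tags : List String) (out : List String) : Decidable (Spec_limit_tags_py tags out) := by unfold Spec_limit_tags_py; infer_instance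

-- ===== CLAIM (what is proved, stated in full; the proofs are below) =====
def Claim_equal_limit_tags_py : Prop := ∀ (tags : List String), Dom_limit_tags_py tags → Spec_limit_tags_py tags (limit_tags_py tags)

-- ===== LEMMAS AND PROOFS =====

-- number of tags A's loop takes, once out is already nonempty, from weights ws
def greedy1 : List Int → Int → Nat
  | [], _ => 0
  | w :: ws, total => if 490 < total + w then 0 else 1 + greedy1 ws (total + w)

-- running sums starting from t
def scanSum : List Int → Int → List Int
  | [], _ => []
  | w :: ws, t => (t + w) :: scanSum ws (t + w)

theorem altCums_foldl (ws : List Int) (acc : List Int) (t : Int) :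
    (ws.foldl (fun (p : List Int × Int) w => (p.1 ++ [p.2 + w], p.2 + w)) (acc, t)).1
      = acc ++ scanSum ws t := by
  induction ws generalizing acc t with
  | nil => simp [scanSum]
  | cons w ws ih => simp [List.foldl, scanSum, ih]

theorem altCums_eq (ws : List Int) : altCums ws = scanSum ws 0 := by
  simpa using altCums_foldl ws [] 0

theorem mem_scanSum_le (ws : List Int) (t : Int) (h : ∀ w ∈ ws, 0 ≤ w) :
    ∀ c ∈ scanSum ws t, t ≤ c := by
  induction ws generalizing t with
  | nil => simp [scanSum]
  | cons w ws ih =>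
    intro c hc
    simp only [scanSum, List.mem_cons] at hc
    have hw : 0 ≤ w := h w (by simp)
    rcases hc with rfl | hc
    · omega
    · have := ih (t + w) (fun x hx => h x (by simp [hx])) c hc
      omega

theorem countP_scanSum (ws : List Int) (t : Int) (h : ∀ w ∈ ws, 0 ≤ w) :
    (scanSum ws t).countP (fun c => c ≤ 490) = greedy1 ws t := by
  induction ws generalizing t with
  | nil => simp [scanSum, greedy1]
  | cons w ws ih =>
    have htail : ∀ x ∈ ws, (0:Int) ≤ x := fun x hx => h x (by simp [hx])
    by_cases hle : t + w ≤ 490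
    · have hgt : ¬ 490 < t + w := by omega
      simp only [scanSum, greedy1, List.countP_cons, if_neg hgt, ih (t + w) htail,
        decide_eq_true_eq, if_pos hle]
      omega
    · have hgt : 490 < t + w := by omega
      have hz : (scanSum ws (t + w)).countP (fun c => c ≤ 490) = 0 := by
        rw [List.countP_eq_zero]
        intro c hc
        have := mem_scanSum_le ws (t + w) htail c hc
        simp only [decide_eq_true_eq]
        omega
      simp only [scanSum, greedy1, List.countP_cons, hz, if_pos hgt,
        decide_eq_true_eq, if_neg hle]

theorem isEmpty_false_of_ne {α : Type} (out : List α) (h : out ≠ []) :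
    out.isEmpty = false := by
  cases out with
  | nil => exact absurd rfl h
  | cons a l => rfl

-- A's loop, once out is nonempty, takes greedy1 of the (len+1) weights
theorem limitA_go_nonempty (ts : List String) (out : List String) (total : Int)
    (h : out ≠ []) :
    limitA_go ts out total
      = out ++ ts.take (greedy1 (ts.map (fun t => PySem.Str.len t + 1)) total) := by
  induction ts generalizing out total with
  | nil => simp [limitA_go, greedy1]
  | cons t ts ih =>
    have hc : (if (false = true) then (0:Int) else 1) = 1 := by norm_num
    simp only [limitA_go, isEmpty_false_of_ne out h, hc, List.map_cons, greedy1]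
    by_cases hgt : 490 < total + (PySem.Str.len t + 1)
    · rw [if_pos hgt, if_pos hgt]; simp
    · rw [if_neg hgt, if_neg hgt]
      rw [ih (out ++ [t]) (total + (PySem.Str.len t + 1)) (by simp)]
      simp [Nat.add_comm 1]

theorem str_len_nonneg (s : String) : 0 ≤ PySem.Str.len s := by
  simp [PySem.Str.len_eq]

theorem limit_tags_eq (tags : List String) :
    limit_tags_py tags = limit_tags_py_alt tags := by
  cases tags with
  | nil => decide
  | cons t0 ts =>
    have hcomb : altCombined (t0 :: ts)
        = PySem.Str.len t0 :: ts.map (fun t => PySem.Str.len t + 1) := by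
      unfold altCombined
      rw [PySem.List.slice_to _ (by norm_num), PySem.List.slice_from _ (by norm_num)]
      simp
    have hnn : ∀ w ∈ ts.map (fun t => PySem.Str.len t + 1), (0:Int) ≤ w := by
      intro w hw
      simp only [List.mem_map] at hw
      obtain ⟨s, _, rfl⟩ := hw
      have := str_len_nonneg s; omega
    have hfold : (altCums (altCombined (t0 :: ts))).foldl
          (fun acc c => if c ≤ 490 then acc + 1 else acc) 0
        = ((altCums (altCombined (t0 :: ts))).countP (fun c => c ≤ 490) : Int) := by
      simpa using PySem.List.foldl_ite_add_one (fun c => c ≤ 490)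
        (altCums (altCombined (t0 :: ts))) 0
    rw [limit_tags_py_alt, hfold, hcomb, altCums_eq]
    have hscan : scanSum (PySem.Str.len t0 :: ts.map (fun t => PySem.Str.len t + 1)) 0
        = PySem.Str.len t0 :: scanSum (ts.map (fun t => PySem.Str.len t + 1)) (PySem.Str.len t0) := by
      simp [scanSum]
    rw [hscan, List.countP_cons, countP_scanSum _ _ hnn]
    have hcond : (0:Int) + (PySem.Str.len t0 + if ([] : List String).isEmpty = true then 0 else 1)
        = PySem.Str.len t0 := by
      simp
    by_cases h0 : 490 < PySem.Str.len t0
    · -- first tag alone already exceeds the limit: both sides are []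
      have hg : greedy1 (ts.map (fun t => PySem.Str.len t + 1)) (PySem.Str.len t0) = 0 := by
        cases ts with
        | nil => rfl
        | cons t1 ts' =>
          simp only [List.map_cons, greedy1]
          rw [if_pos (by have := str_len_nonneg t1; omega)]
      have hA : limit_tags_py (t0 :: ts) = [] := by
        simp only [limit_tags_py, limitA_go, hcond]
        rw [if_pos h0]
      rw [hA, hg, if_neg (by simp only [decide_eq_true_eq]; omega)]
      rw [PySem.List.slice_to_natCast]
      simp
    · -- the first tag fits
      have hA : limit_tags_py (t0 :: ts)
          = t0 :: ts.take (greedy1 (ts.map (fun t => PySem.Str.len t + 1)) (PySem.Str.len t0)) := by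
        simp only [limit_tags_py, limitA_go, hcond]
        rw [if_neg h0]
        rw [limitA_go_nonempty ts ([] ++ [t0]) (PySem.Str.len t0) (by simp)]
        simp
      rw [hA, if_pos (by simp only [decide_eq_true_eq]; omega)]
      rw [PySem.List.slice_to_natCast]
      simp [List.take_succ_cons]

-- ===== VERDICT (by name: the statement is the Claim_ definition above) =====
theorem limit_tags_py_spec : Claim_equal_limit_tags_py := by
  intro tags _
  exact limit_tags_eq tags
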